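-- pv_equiv track=rewrite | github.com/mattjmorrison/advent-of-code | 2024/12/puzzle.py | count_column_gaps
-- ===== SOURCE A (Python) =====
-- from collections import defaultdict
--
-- def count_column_gaps(  # noqa: C901
--     edge_plots: list[tuple[int, int]]
-- ) -> int:
--     groups = defaultdict(list)
--     for plot in edge_plots:
--         groups[plot[0]].append(plot[1])
--     edges = 0
--     for a in groups.values():
--         b = sorted(a)
--         edges += 1
--         for i in range(len(b) - 1):
--             if b[i] + 1 != b[i + 1]:
--                 edges += 1
--     return edges
-- ===== SOURCE B (Python) =====
-- def count_column_gaps(  # noqa: C901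
--     edge_plots: list[tuple[int, int]]
-- ) -> int:
--     plots = set(edge_plots)
--     links = 0
--     for c, r in plots:
--         if (c, r + 1) in plots:
--             links += 1
--     return len(edge_plots) - links
-- ===== Notes on version B (the rewrite author's own statement) =====
-- stated objective: alternative
-- what changed: Replaces grouping rows by column into a defaultdict, sorting each column and scanning adjacent entries for gaps, by a single pass over the set of distinct plots counting column-successor links and returning len(edge_plots) - links.
import Mathlib
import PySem

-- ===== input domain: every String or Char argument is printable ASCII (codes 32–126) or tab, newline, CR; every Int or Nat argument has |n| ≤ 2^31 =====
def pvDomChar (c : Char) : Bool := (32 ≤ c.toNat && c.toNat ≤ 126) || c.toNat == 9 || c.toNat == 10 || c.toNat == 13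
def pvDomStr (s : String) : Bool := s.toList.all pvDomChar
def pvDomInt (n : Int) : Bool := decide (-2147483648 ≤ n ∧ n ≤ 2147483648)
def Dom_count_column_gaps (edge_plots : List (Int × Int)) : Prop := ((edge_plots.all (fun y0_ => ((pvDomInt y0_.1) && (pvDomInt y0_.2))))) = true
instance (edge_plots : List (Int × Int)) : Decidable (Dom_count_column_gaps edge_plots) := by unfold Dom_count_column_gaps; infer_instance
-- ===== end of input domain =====

-- B replaces A's group-by-column + per-column sort + adjacent-gap scan by one pass over the
-- distinct plots counting column-successor links: answer = len(edge_plots) - links.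

-- ===== PORT A =====
-- groups = defaultdict(list); for plot in edge_plots: groups[plot[0]].append(plot[1])
-- then for each value list: sort, count 1 + adjacent non-successor gaps.
def count_column_gaps (edge_plots : List (Int × Int)) : Int :=
  let groups : PySem.Dict Int (List Int) :=
    edge_plots.foldl (fun d plot => d.modify plot.1 [] (· ++ [plot.2])) PySem.Dict.empty
  groups.values.foldl (fun edges a =>
    let b := PySem.List.sorted a (fun x => x) false
    -- inner loop: for i in range(len(b) - 1); indices i, i+1 are always in range, so getD 0 is exact
    (PySem.List.pyRange 0 ((b.length : Int) - 1) 1).foldl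
      (fun e i => if PySem.List.pyGetD b i 0 + 1 ≠ PySem.List.pyGetD b (i + 1) 0 then e + 1 else e)
      (edges + 1)) 0

-- ===== PORT B =====
def count_column_gaps_alt (edge_plots : List (Int × Int)) : Int :=
  let plots : PySem.Set (Int × Int) := PySem.Set.ofList edge_plots
  let links : Int :=
    plots.foldl (fun links p => if PySem.Set.contains plots (p.1, p.2 + 1) then links + 1 else links) 0
  (edge_plots.length : Int) - links

-- ===== PRECONDITION & SPEC =====
def Spec_count_column_gaps (edge_plots : List (Int × Int)) (out : Int) : Prop := out = count_column_gaps_alt edge_plots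
instance (edge_plots : List (Int × Int)) (out : Int) : Decidable (Spec_count_column_gaps edge_plots out) := by unfold Spec_count_column_gaps; infer_instance

-- ===== CLAIM (what is proved, stated in full; the proofs are below) =====
def Claim_equal_count_column_gaps : Prop := ∀ (edge_plots : List (Int × Int)), Dom_count_column_gaps edge_plots → Spec_count_column_gaps edge_plots (count_column_gaps edge_plots)

-- ===== LEMMAS AND PROOFS =====

-- number of adjacent non-successor pairs in a list (A's inner loop on a sorted list)
def pvBreaks : List Int → Int
  | x :: y :: t => (if x + 1 ≠ y then 1 else 0) + pvBreaks (y :: t)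
  | _ => 0

-- the rows (with multiplicity, in order) that A groups under column c
def pvRows (l : List (Int × Int)) (c : Int) : List Int :=
  (l.filter (fun p => p.1 == c)).map (fun p => p.2)

-- link count of a finite set of rows: rows whose successor is also present
def pvLinkR (t : Finset Int) : ℕ := (t.filter (fun r => r + 1 ∈ t)).card

-- A's inner index loop is pvBreaks
theorem pv_zip_foldl (b : List Int) (e : Int) :
    (b.zip b.tail).foldl (fun e q => if q.1 + 1 ≠ q.2 then e + 1 else e) e = e + pvBreaks b := by
  induction b generalizing e with
  | nil => simp [pvBreaks]
  | cons x t ih =>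
    cases t with
    | nil => simp [pvBreaks]
    | cons y t' =>
      simp only [List.zip_cons_cons, List.tail, List.foldl_cons] at *
      rw [ih]
      simp only [pvBreaks]
      split_ifs <;> ring

theorem pv_inner (b : List Int) (e : Int) :
    (PySem.List.pyRange 0 ((b.length : Int) - 1) 1).foldl
      (fun e i => if PySem.List.pyGetD b i 0 + 1 ≠ PySem.List.pyGetD b (i + 1) 0 then e + 1 else e) e
    = e + pvBreaks b := by
  rcases b with _ | ⟨x, t⟩
  · rw [PySem.List.pyRange_one_eq_nil (by norm_num)]
    simp [pvBreaks]
  · have hlen : (((x :: t).zip (x :: t).tail).length : Int) = ((x :: t).length : Int) - 1 := by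
      simp [List.length_zip]
    have h2 := pv_zip_foldl (x :: t) e
    rw [← h2,
        ← PySem.List.foldl_pyRange_zero_pyGetD' ((x :: t).zip (x :: t).tail) ((0 : Int), (0 : Int))
          (fun e (q : Int × Int) => if q.1 + 1 ≠ q.2 then e + 1 else e) e,
        ← hlen]
    apply PySem.List.foldl_congr_mem
    intro acc i hi
    obtain ⟨h0, h1⟩ := PySem.List.mem_pyRange_one.mp hi
    have hzl : ((x :: t).zip (x :: t).tail).length = t.length := by
      simp [List.length_zip]
    have hit : i.toNat < t.length := by omega
    have hi1 : (i + 1).toNat = i.toNat + 1 := by omega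
    have e1 : PySem.List.pyGetD (x :: t) i 0 = (x :: t)[i.toNat]'(by simp; omega) :=
      PySem.List.pyGetD_eq_getElem (x :: t) 0 h0 (by simp; omega)
    have e2 : PySem.List.pyGetD (x :: t) (i + 1) 0 = (x :: t)[i.toNat + 1]'(by simp; omega) := by
      rw [PySem.List.pyGetD_eq_getElem (x :: t) 0 (by omega) (by simp; omega)]
      simp [hi1]
    have e3 : PySem.List.pyGetD ((x :: t).zip (x :: t).tail) i ((0 : Int), (0 : Int))
        = ((x :: t)[i.toNat]'(by simp; omega), (x :: t)[i.toNat + 1]'(by simp; omega)) := by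
      rw [PySem.List.pyGetD_eq_getElem _ _ h0 (by omega)]
      simp [List.getElem_zip]
    rw [e1, e2, e3]

-- per-column identity on a sorted nonempty list
theorem pv_sorted_breaks (b : List Int) (hs : b.Pairwise (· ≤ ·)) (hne : b ≠ []) :
    1 + pvBreaks b = (b.length : Int) - (pvLinkR b.toFinset : Int) := by
  induction b with
  | nil => exact absurd rfl hne
  | cons x t ih =>
    rcases t with _ | ⟨y, t'⟩
    · have h0 : pvLinkR ({x} : Finset Int) = 0 := by
        unfold pvLinkR
        rw [Finset.card_eq_zero, Finset.filter_eq_empty_iff]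
        intro r hr
        simp only [Finset.mem_singleton] at *
        omega
      simp [pvBreaks, h0]
    · have hxy : x ≤ y := (List.pairwise_cons.mp hs).1 y (by simp)
      have htail : (y :: t').Pairwise (· ≤ ·) := (List.pairwise_cons.mp hs).2
      have hge : ∀ z ∈ y :: t', y ≤ z := by
        intro z hz
        rcases List.mem_cons.mp hz with h | h
        · omega
        · exact (List.pairwise_cons.mp htail).1 z h
      have IH := ih htail (by simp)
      by_cases heq : x = y
      · subst heq
        have hfs : (x :: x :: t').toFinset = (x :: t').toFinset := by
          simp [List.toFinset_cons]
        have hbr : pvBreaks (x :: x :: t') = 1 + pvBreaks (x :: t') := by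
          rw [show pvBreaks (x :: x :: t') = (if x + 1 ≠ x then 1 else 0) + pvBreaks (x :: t') from rfl,
              if_pos (by omega)]
        rw [hbr, hfs]
        simp only [List.length_cons] at IH ⊢
        push_cast at IH ⊢
        omega
      · have hlt : x < y := lt_of_le_of_ne hxy heq
        have hnx : x ∉ (y :: t').toFinset := by
          simp only [List.mem_toFinset]
          intro hmem
          exact absurd (hge x hmem) (by omega)
        have hfs : (x :: y :: t').toFinset = insert x ((y :: t').toFinset) := by
          simp [List.toFinset_cons]
        have hmemiff : (x + 1 ∈ (x :: y :: t').toFinset) ↔ x + 1 = y := by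
          rw [hfs]
          simp only [Finset.mem_insert, List.mem_toFinset]
          constructor
          · rintro (h | h)
            · omega
            · have := hge _ h
              omega
          · intro h
            right
            simp [h]
        have hcard : pvLinkR (x :: y :: t').toFinset
            = (if x + 1 = y then 1 else 0) + pvLinkR (y :: t').toFinset := by
          unfold pvLinkR
          rw [hfs, Finset.filter_insert]
          have hcong : Finset.filter (fun r => r + 1 ∈ insert x ((y :: t').toFinset)) ((y :: t').toFinset)
              = Finset.filter (fun r => r + 1 ∈ (y :: t').toFinset) ((y :: t').toFinset) := by
            apply Finset.filter_congr
            intro r hr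
            have hry : y ≤ r := hge r (List.mem_toFinset.mp hr)
            simp only [Finset.mem_insert]
            constructor
            · rintro (h | h)
              · omega
              · exact h
            · intro h
              right
              exact h
          rw [hcong]
          by_cases hsucc : x + 1 = y
          · rw [if_pos (by rw [← hfs]; exact hmemiff.mpr hsucc),
                Finset.card_insert_of_notMem (fun hc => hnx (Finset.mem_of_mem_filter _ hc)),
                if_pos hsucc]
            omega
          · rw [if_neg (by rw [← hfs]; intro hc; exact hsucc (hmemiff.mp hc)), if_neg hsucc]
            omega
        have hbr : pvBreaks (x :: y :: t') = (if x + 1 = y then 0 else 1) + pvBreaks (y :: t') := by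
          rw [show pvBreaks (x :: y :: t') = (if x + 1 ≠ y then 1 else 0) + pvBreaks (y :: t') from rfl]
          by_cases hsucc : x + 1 = y
          · rw [if_neg (by omega), if_pos hsucc]
          · rw [if_pos hsucc, if_neg hsucc]
        by_cases hsucc : x + 1 = y
        · rw [hcard, hbr, if_pos hsucc, if_pos hsucc]
          simp only [List.length_cons] at IH ⊢
          push_cast at IH ⊢
          omega
        · rw [hcard, hbr, if_neg hsucc, if_neg hsucc]
          simp only [List.length_cons] at IH ⊢
          push_cast at IH ⊢
          omega

-- total length of the per-column row lists
theorem pv_len_split (l : List (Int × Int)) (s : Finset Int) (h : ∀ p ∈ l, p.1 ∈ s) :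
    (∑ c ∈ s, (l.countP (fun p => p.1 == c))) = l.length := by
  induction l with
  | nil => simp
  | cons p t ih =>
    simp only [List.countP_cons]
    rw [Finset.sum_add_distrib]
    rw [ih (fun q hq => h q (List.mem_cons_of_mem _ hq))]
    have hp : p.1 ∈ s := h p (List.mem_cons_self)
    have : (∑ c ∈ s, (if (p.1 == c) = true then 1 else 0)) = 1 := by
      rw [Finset.sum_eq_single p.1]
      · simp
      · intro c _ hc; simp [beq_iff_eq]; omega
      · intro hc; exact absurd hp hc
    simp only [List.length_cons]; omega

-- the distinct rows of column c are exactly the pairs (c, r) among the distinct plots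
theorem pv_mem_rowsF (l : List (Int × Int)) (c r : Int) :
    r ∈ (pvRows l c).toFinset ↔ (c, r) ∈ l.toFinset := by
  simp only [List.mem_toFinset, pvRows, List.mem_map, List.mem_filter, beq_iff_eq]
  constructor
  · rintro ⟨p, ⟨hp, hc⟩, hr⟩
    have : p = (c, r) := by cases p; simp_all
    exact this ▸ hp
  · intro h; exact ⟨(c, r), ⟨h, rfl⟩, rfl⟩

-- partition of the global link count by column
theorem pv_links_split (l : List (Int × Int)) :
    (∑ c ∈ (l.map Prod.fst).toFinset, pvLinkR (pvRows l c).toFinset)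
      = (l.toFinset.filter (fun p => (p.1, p.2 + 1) ∈ l.toFinset)).card := by
  rw [Finset.card_eq_sum_card_fiberwise
        (f := Prod.fst) (t := (l.map Prod.fst).toFinset)
        (fun p hp =>
          List.mem_toFinset.mpr (List.mem_map.mpr
            ⟨p, List.mem_toFinset.mp (Finset.mem_of_mem_filter _ hp), rfl⟩))]
  apply Finset.sum_congr rfl
  intro c _
  unfold pvLinkR
  apply Finset.card_bij (fun r _ => (c, r))
  · intro r hr
    obtain ⟨hr1, hr2⟩ := Finset.mem_filter.mp hr
    refine Finset.mem_filter.mpr ⟨Finset.mem_filter.mpr ⟨(pv_mem_rowsF l c r).mp hr1, ?_⟩, rfl⟩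
    exact (pv_mem_rowsF l c (r + 1)).mp hr2
  · intro r _ r' _ h
    exact (Prod.mk.injEq _ _ _ _).mp h |>.2
  · intro p hp
    obtain ⟨hp1, hp2⟩ := Finset.mem_filter.mp hp
    obtain ⟨hp3, hp4⟩ := Finset.mem_filter.mp hp1
    refine ⟨p.2, Finset.mem_filter.mpr ⟨?_, ?_⟩, ?_⟩
    · exact (pv_mem_rowsF l c p.2).mpr (by rw [← hp2]; simpa using hp3)
    · exact (pv_mem_rowsF l c (p.2 + 1)).mpr (by rw [← hp2]; simpa using hp4)
    · rw [← hp2]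

-- sum over a nodup list as a Finset sum
theorem pv_sum_list (ks : List Int) (f : Int → Int) (h : ks.Nodup) :
    (ks.map f).sum = ∑ c ∈ ks.toFinset, f c := by
  induction ks with
  | nil => simp
  | cons k t ih =>
    obtain ⟨hk, ht⟩ := List.nodup_cons.mp h
    rw [List.map_cons, List.sum_cons, List.toFinset_cons,
        Finset.sum_insert (by simpa using hk), ih ht]

-- A's outer loop over the value lists
theorem pv_outer (vals : List (List Int)) (init : Int) :
    vals.foldl (fun edges a =>
      (PySem.List.pyRange 0 (((PySem.List.sorted a (fun x => x) false).length : Int) - 1) 1).foldl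
        (fun e i => if PySem.List.pyGetD (PySem.List.sorted a (fun x => x) false) i 0 + 1
            ≠ PySem.List.pyGetD (PySem.List.sorted a (fun x => x) false) (i + 1) 0 then e + 1 else e)
        (edges + 1)) init
    = init + (vals.map (fun a => 1 + pvBreaks (PySem.List.sorted a (fun x => x) false))).sum := by
  induction vals generalizing init with
  | nil => simp
  | cons a t ih =>
    simp only [List.foldl_cons, List.map_cons, List.sum_cons]
    rw [pv_inner, ih]
    ring

theorem count_column_gaps_eq (l : List (Int × Int)) :
    count_column_gaps l = count_column_gaps_alt l := by
  -- B side
  have hB : count_column_gaps_alt l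
      = (l.length : Int)
        - ((l.toFinset.filter (fun p => (p.1, p.2 + 1) ∈ l.toFinset)).card : Int) := by
    simp only [count_column_gaps_alt]
    rw [PySem.List.foldl_if_add_one]
    have hnd : (PySem.Set.ofList l).Nodup := PySem.Set.nodup_ofList l
    have hfilt : ((PySem.Set.ofList l).filter
          (fun p => PySem.Set.contains (PySem.Set.ofList l) (p.1, p.2 + 1))).toFinset
        = l.toFinset.filter (fun p => (p.1, p.2 + 1) ∈ l.toFinset) := by
      ext q
      simp [PySem.Set.mem_ofList]
    have hcount : (((PySem.Set.ofList l).countP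
          (fun p => PySem.Set.contains (PySem.Set.ofList l) (p.1, p.2 + 1))) : Int)
        = ((l.toFinset.filter (fun p => (p.1, p.2 + 1) ∈ l.toFinset)).card : Int) := by
      rw [List.countP_eq_length_filter,
          ← List.toFinset_card_of_nodup (List.Nodup.filter _ hnd), hfilt]
    rw [hcount]
    ring
  rw [hB]
  -- A side
  simp only [count_column_gaps]
  have hkeys : (l.foldl (fun d (plot : Int × Int) => d.modify plot.1 [] (· ++ [plot.2]))
        (PySem.Dict.empty : PySem.Dict Int (List Int))).keys
      = PySem.Set.ofList (l.map Prod.fst) := by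
    rw [PySem.Dict.keys_foldl_modify_key]
    simp [PySem.Set.update_nil_left]
  have hnodup : (l.foldl (fun d (plot : Int × Int) => d.modify plot.1 [] (· ++ [plot.2]))
        (PySem.Dict.empty : PySem.Dict Int (List Int))).keys.Nodup := by
    rw [hkeys]; exact PySem.Set.nodup_ofList _
  have hgetD : ∀ c, (l.foldl (fun d (plot : Int × Int) => d.modify plot.1 [] (· ++ [plot.2]))
        (PySem.Dict.empty : PySem.Dict Int (List Int))).getD c [] = pvRows l c := by
    intro c
    rw [PySem.Dict.getD_foldl_modify_append]
    simp [pvRows]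
  rw [pv_outer, PySem.Dict.values_eq_map_keys _ hnodup [], hkeys]
  have hmap : (PySem.Set.ofList (l.map Prod.fst)).map
        (fun k => (l.foldl (fun d (plot : Int × Int) => d.modify plot.1 [] (· ++ [plot.2]))
          (PySem.Dict.empty : PySem.Dict Int (List Int))).getD k [])
      = (PySem.Set.ofList (l.map Prod.fst)).map (fun c => pvRows l c) := by
    apply List.map_congr_left
    intro c _
    exact hgetD c
  rw [hmap]
  simp only [List.map_map, Function.comp_def]
  rw [pv_sum_list _ _ (PySem.Set.nodup_ofList _)]
  have hcolsF : (PySem.Set.ofList (l.map Prod.fst)).toFinset = (l.map Prod.fst).toFinset := by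
    ext c
    simp [PySem.Set.mem_ofList]
  rw [hcolsF]
  have hterm : ∀ c ∈ (l.map Prod.fst).toFinset,
      (1 + pvBreaks (PySem.List.sorted (pvRows l c) (fun x => x) false))
        = ((pvRows l c).length : Int) - (pvLinkR (pvRows l c).toFinset : Int) := by
    intro c hc
    have hcne : pvRows l c ≠ [] := by
      simp only [List.mem_toFinset, List.mem_map] at hc
      obtain ⟨p, hp, hpc⟩ := hc
      simp only [pvRows, ne_eq, List.map_eq_nil_iff, List.filter_eq_nil_iff]
      intro h
      exact h p hp (by simp [hpc])
    have hperm : (PySem.List.sorted (pvRows l c) (fun x => x) false).Perm (pvRows l c) :=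
      PySem.List.sorted_perm _ _ _
    have hsne : PySem.List.sorted (pvRows l c) (fun x => x) false ≠ [] := by
      rw [ne_eq, PySem.List.sorted_eq_nil_iff]
      exact hcne
    have := pv_sorted_breaks (PySem.List.sorted (pvRows l c) (fun x => x) false)
      (by simpa using PySem.List.sorted_pairwise (pvRows l c) (fun x => x)) hsne
    have hfin : (PySem.List.sorted (pvRows l c) (fun x => x) false).toFinset
        = (pvRows l c).toFinset := by
      ext r
      simp [PySem.List.mem_sorted]
    rw [this, hperm.length_eq, hfin]
  rw [Finset.sum_congr rfl hterm, Finset.sum_sub_distrib]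
  have hlen : (∑ c ∈ (l.map Prod.fst).toFinset, ((pvRows l c).length : Int))
      = (l.length : Int) := by
    have h1 : ∀ c, (pvRows l c).length = l.countP (fun p => p.1 == c) := by
      intro c
      simp [pvRows, List.countP_eq_length_filter]
    have h2 := pv_len_split l (l.map Prod.fst).toFinset
      (fun p hp => by simp only [List.mem_toFinset, List.mem_map]; exact ⟨p, hp, rfl⟩)
    calc (∑ c ∈ (l.map Prod.fst).toFinset, ((pvRows l c).length : Int))
        = ((∑ c ∈ (l.map Prod.fst).toFinset, (pvRows l c).length : ℕ) : Int) := by push_cast; rfl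
      _ = (l.length : Int) := by
          rw [Finset.sum_congr rfl (fun c _ => h1 c), h2]
  have hlinks : (∑ c ∈ (l.map Prod.fst).toFinset, ((pvLinkR (pvRows l c).toFinset : Int)))
      = ((l.toFinset.filter (fun p => (p.1, p.2 + 1) ∈ l.toFinset)).card : Int) := by
    rw [← pv_links_split l]
    push_cast
    rfl
  rw [hlen, hlinks]
  ring

-- ===== VERDICT (by name: the statement is the Claim_ definition above) =====
theorem count_column_gaps_spec : Claim_equal_count_column_gaps := by
  intro l _
  exact count_column_gaps_eq l
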